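-- pv_equiv track=rewrite | github.com/hbazille/adventofcode | 2021/exo49.py | updateEast
-- ===== SOURCE A (Python) =====
-- def checkMoveEast(grid,i,j):
--     m = len(grid[0])
--     return grid[i][(j+1)%m] == " "
--
-- def updateEast(grid):
--     n = len(grid)
--     m  = len(grid[0])
--     hasChanged = False
--     for i in range(n):
--         first = grid[i][0]
--         j = 0
--         while j < m-1:
--             if grid[i][j] == "E" and checkMoveEast(grid,i,j):
--                 hasChanged = True
--                 grid[i][j] = " "
--                 grid[i][j+1] = "E"
--                 j += 1
--             j += 1
--         if j == m-1 and grid[i][j] == "E" and first == " ":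
--             grid[i][j] = " "
--             grid[i][0] = "E"
--             hasChanged = True
--     return hasChanged
-- ===== SOURCE B (Python) =====
-- def updateEast(grid):
--     # Simultaneous update computed from a snapshot of each row (mutates grid in place like A).
--     m = len(grid[0])
--     changed = False
--     for row in grid:
--         snap = row[:]
--         for j in range(m):
--             cur = snap[j]
--             if cur == "E" and snap[(j + 1) % m] == " ":
--                 new = " "
--             elif cur == " " and snap[(j - 1) % m] == "E":
--                 new = "E"
--             else:
--                 new = cur
--             if new != cur:
--                 row[j] = new
--                 changed = True
--     return changed
-- ===== Notes on version B (the rewrite author's own statement) =====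
-- stated objective: alternative
-- what changed: A scans each row left-to-right with an index-skipping while loop that mutates as it goes plus a special wrap-around case after the loop; B copies each row to a snapshot and computes every cell's new value independently from the snapshot by one uniform modular-neighbour rule (cell becomes ' ' if it is an 'E' with a blank right neighbour, 'E' if it is a blank with an 'E' left neighbour), with no special case for the wrap column.
import Mathlib
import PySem

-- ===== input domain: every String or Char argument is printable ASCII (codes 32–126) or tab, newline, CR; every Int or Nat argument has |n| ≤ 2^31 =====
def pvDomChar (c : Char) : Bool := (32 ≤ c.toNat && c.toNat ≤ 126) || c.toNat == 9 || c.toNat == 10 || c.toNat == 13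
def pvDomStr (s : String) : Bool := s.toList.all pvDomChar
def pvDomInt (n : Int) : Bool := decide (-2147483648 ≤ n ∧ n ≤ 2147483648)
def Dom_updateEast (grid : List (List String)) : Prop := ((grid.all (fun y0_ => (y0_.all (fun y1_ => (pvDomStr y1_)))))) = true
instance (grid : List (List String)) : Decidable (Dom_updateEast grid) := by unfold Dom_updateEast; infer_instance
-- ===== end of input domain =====

-- B replaces A's in-place skipping scan by a simultaneous update computed per cell from a
-- row snapshot (objective: alternative).  Both Pythons mutate grid in place identically;
-- the equivalence proved here is about the RETURN value.

-- ===== PORT A =====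
-- helper checkMoveEast(grid,i,j): grid[i][(j+1)%m] == " "  (in-range reads under Pre_)
def checkMoveEast (grid : List (List String)) (i j : Nat) : Bool :=
  let m := (grid.getD 0 []).length
  (grid.getD i []).getD ((j + 1) % m) "" == " "

-- the inner `while j < m-1` loop of A, threading the mutated grid; state (grid, j, hasChanged)
def loopA (g : List (List String)) (i m j : Nat) (changed : Bool) :
    List (List String) × Nat × Bool :=
  if h : j < m - 1 then
    if (g.getD i []).getD j "" == "E" && checkMoveEast g i j then
      loopA (g.set i (((g.getD i []).set j " ").set (j + 1) "E")) i m (j + 2) true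
    else loopA g i m (j + 1) changed
  else (g, j, changed)
termination_by m - 1 - j
decreasing_by all_goals omega

def updateEast (grid : List (List String)) : Bool :=
  let n := grid.length
  let m := (grid.getD 0 []).length
  (((List.range n).foldl (fun (st : List (List String) × Bool) i =>
      let first := (st.1.getD i []).getD 0 ""
      let r := loopA st.1 i m 0 st.2
      if r.2.1 == m - 1 && ((r.1.getD i []).getD r.2.1 "" == "E") && first == " " then
        (r.1.set i (((r.1.getD i []).set r.2.1 " ").set 0 "E"), true)
      else (r.1, r.2.2)) (grid, false))).2

-- ===== PORT B =====
-- the per-cell rule of Source B; Python's (j-1) % m is ported as (j + m - 1) % m,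
-- exact for 0 ≤ j < m and 1 ≤ m (the only calls; m = 0 is outside Pre_)
def cellB (snap : List String) (m j : Nat) : String :=
  let cur := snap.getD j ""
  if cur == "E" && snap.getD ((j + 1) % m) "" == " " then " "
  else if cur == " " && snap.getD ((j + m - 1) % m) "" == "E" then "E"
  else cur

def updateEast_alt (grid : List (List String)) : Bool :=
  let m := (grid.getD 0 []).length
  grid.foldl (fun changed row =>
    (List.range m).foldl (fun changed j =>
      if cellB row m j != row.getD j "" then true else changed) changed) false

-- ===== PRECONDITION & SPEC =====
-- Pre_: exactly the inputs on which the Python A returns (A raises IndexError on an empty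
-- grid, on a zero-width first row, and on any row shorter than the first row's length)
def Pre_updateEast (grid : List (List String)) : Prop :=
  grid ≠ [] ∧ 1 ≤ (grid.getD 0 []).length ∧
    ∀ row ∈ grid, (grid.getD 0 []).length ≤ row.length
instance (grid : List (List String)) : Decidable (Pre_updateEast grid) := by
  unfold Pre_updateEast; infer_instance

def pvWitness_updateEast : List (List String) := [["E", " ", "E"], [" ", "E", "E"]]

def Spec_updateEast (grid : List (List String)) (out : Bool) : Prop := out = updateEast_alt grid
instance (grid : List (List String)) (out : Bool) : Decidable (Spec_updateEast grid out) := by unfold Spec_updateEast; infer_instance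

-- ===== CLAIM (what is proved, stated in full; the proofs are below) =====
def Claim_equal_updateEast : Prop := ∀ (grid : List (List String)), Dom_updateEast grid → Pre_updateEast grid → Spec_updateEast grid (updateEast grid)

-- ===== LEMMAS AND PROOFS =====

-- a cell k < m of `row` that can move east (reading indices mod m)
abbrev pairAt (row : List String) (m k : Nat) : Prop :=
  row.getD k "" = "E" ∧ row.getD ((k + 1) % m) "" = " "

-- the common reference value: some cell of some row can move east
def anyPair (m : Nat) (grid : List (List String)) : Bool :=
  grid.any fun row => decide (∃ k < m, pairAt row m k)

-- getD/set basics used throughout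
theorem getD_set_ne {a : Type} [Inhabited a] (l : List a) (i k : Nat) (x d : a) (h : i ≠ k) :
    (l.set i x).getD k d = l.getD k d := by
  simp [List.getD, List.getElem?_set_ne h]

theorem getD_set_self (g : List (List String)) (i : Nat) (r : List String) :
    (g.set i r).getD i [] = if i < g.length then r else g.getD i [] := by
  by_cases hi : i < g.length
  · simp [List.getD, hi]
  · rw [List.set_eq_of_length_le (by omega)]; simp [hi]

theorem getD_set_len (g : List (List String)) (i : Nat) (r : List String)
    (hr : r.length = (g.getD i []).length) (k : Nat) :
    ((g.set i r).getD k []).length = (g.getD k []).length := by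
  by_cases h : i = k
  · subst h
    rw [getD_set_self]
    split
    · exact hr
    · rfl
  · rw [getD_set_ne _ _ _ _ _ h]

theorem loopA_other (g : List (List String)) (i m j : Nat) (changed : Bool)
    (i' : Nat) (h : i' ≠ i) :
    (loopA g i m j changed).1.getD i' [] = g.getD i' [] := by
  unfold loopA
  split
  · split
    · rw [loopA_other _ _ _ _ _ _ h, getD_set_ne _ _ _ _ _ (by omega)]
    · exact loopA_other _ _ _ _ _ _ h
  · rfl
termination_by m - 1 - j
decreasing_by all_goals omega

theorem loopA_len (g : List (List String)) (i m j : Nat) (changed : Bool) (k : Nat) :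
    ((loopA g i m j changed).1.getD k []).length = (g.getD k []).length := by
  unfold loopA
  split
  · split
    · rw [loopA_len _ _ _ _ _ _, getD_set_len _ _ _ (by simp)]
    · exact loopA_len _ _ _ _ _ _
  · rfl
termination_by m - 1 - j
decreasing_by all_goals omega

theorem loopA_wrap (m : Nat) (orig : List String) (i : Nat) (j : Nat)
    (g : List (List String)) (changed : Bool)
    (hlen : (g.getD 0 []).length = m)
    (hag : ∀ k, j ≤ k → (g.getD i []).getD k "" = orig.getD k "") :
    (let r := loopA g i m j changed
     (if r.2.1 == m - 1 && ((r.1.getD i []).getD r.2.1 "" == "E") && orig.getD 0 "" == " "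
      then true else r.2.2))
    = (changed || decide (∃ k < m, j ≤ k ∧ pairAt orig m k)) := by
  rw [loopA]
  split
  case isTrue hj =>
    have hj1 : (j + 1) % m = j + 1 := Nat.mod_eq_of_lt (by omega)
    split
    case isTrue hcond =>
      -- a move at j: pairAt orig m j holds
      simp only [checkMoveEast, hlen, Bool.and_eq_true, beq_iff_eq, hj1] at hcond
      have hpair : pairAt orig m j := by
        constructor
        · rw [← hag j le_rfl]; exact hcond.1
        · rw [hj1, ← hag (j + 1) (by omega)]; exact hcond.2
      have hag' : ∀ k, j + 2 ≤ k →
          (((g.set i (((g.getD i []).set j " ").set (j + 1) "E")).getD i []).getD k "")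
            = orig.getD k "" := by
        intro k hk
        rw [getD_set_self]
        split
        · rw [getD_set_ne _ _ _ _ _ (by omega), getD_set_ne _ _ _ _ _ (by omega)]
          exact hag k (by omega)
        · exact hag k (by omega)
      rw [loopA_wrap m orig i (j + 2) _ true
            (by rw [getD_set_len _ _ _ (by simp)]; exact hlen) hag']
      have hex : (∃ k < m, j ≤ k ∧ pairAt orig m k) := ⟨j, by omega, le_rfl, hpair⟩
      simp [hex]
    case isFalse hcond =>
      have hnp : ¬ pairAt orig m j := by
        intro ⟨h1, h2⟩
        apply hcond
        simp only [checkMoveEast, hlen, Bool.and_eq_true, beq_iff_eq, hj1]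
        exact ⟨by rw [hag j le_rfl]; exact h1, by rw [hag (j + 1) (by omega)]; rw [hj1] at h2; exact h2⟩
      rw [loopA_wrap m orig i (j + 1) _ changed hlen (fun k hk => hag k (by omega))]
      congr 1
      refine decide_eq_decide.mpr ⟨fun ⟨k, hk, hjk, hp⟩ => ⟨k, hk, by omega, hp⟩, ?_⟩
      rintro ⟨k, hk, hjk, hp⟩
      refine ⟨k, hk, ?_, hp⟩
      rcases Nat.eq_or_lt_of_le hjk with h | h
      · exact absurd (h ▸ hp) hnp
      · omega
  case isFalse hj =>
    simp only
    by_cases hjm : j = m - 1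
    · subst hjm
      by_cases hm : m = 0
      · subst hm
        have h0 : (0 : Nat) - 1 = 0 := rfl
        rw [h0] at hag ⊢
        have hnx : ¬ (∃ k < 0, 0 ≤ k ∧ pairAt orig 0 k) := by rintro ⟨k, hk, _⟩; omega
        rw [decide_eq_false hnx, Bool.or_false, hag 0 le_rfl]
        split
        next h =>
          simp only [Bool.and_eq_true, beq_iff_eq] at h
          have hA : orig.getD 0 "" = "E" := by tauto
          have hB : orig.getD 0 "" = " " := by tauto
          exact absurd (hA ▸ hB) (by decide)
        next => rfl
      · have hm1 : 1 ≤ m := by omega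
        have hmod : (m - 1 + 1) % m = 0 := by
          have h : m - 1 + 1 = m := by omega
          rw [h, Nat.mod_self]
        have hex : (∃ k < m, m - 1 ≤ k ∧ pairAt orig m k) ↔ pairAt orig m (m - 1) := by
          constructor
          · rintro ⟨k, hk, hjk, hp⟩
            have h : k = m - 1 := by omega
            exact h ▸ hp
          · intro hp; exact ⟨m - 1, by omega, le_rfl, hp⟩
        rw [hag (m - 1) le_rfl]
        by_cases h1 : orig.getD (m - 1) "" = "E"
        · by_cases h2 : orig.getD 0 "" = " "
          · have hx : (∃ k < m, m - 1 ≤ k ∧ pairAt orig m k) :=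
              hex.mpr ⟨h1, by rw [hmod]; exact h2⟩
            rw [decide_eq_true hx]
            simp only [List.getD] at h1 h2
            simp [h1, h2]
          · have hnx : ¬ (∃ k < m, m - 1 ≤ k ∧ pairAt orig m k) := by
              rw [hex]; rintro ⟨_, hb⟩; rw [hmod] at hb; exact h2 hb
            rw [decide_eq_false hnx]
            simp only [List.getD] at h2
            simp [h2]
        · have hnx : ¬ (∃ k < m, m - 1 ≤ k ∧ pairAt orig m k) := by
            rw [hex]; rintro ⟨ha, _⟩; exact h1 ha
          rw [decide_eq_false hnx]
          simp only [List.getD] at h1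
          simp [h1]
    · have hnx : ¬ (∃ k < m, j ≤ k ∧ pairAt orig m k) := by
        rintro ⟨k, hk, hjk, _⟩; omega
      rw [decide_eq_false hnx]
      have hb : (j == m - 1) = false := by simp [hjm]
      simp [hb]
termination_by m - 1 - j
decreasing_by all_goals omega

-- generic: folding "accumulate with ||" computes any
theorem foldl_step_any {a : Type} (f : a → Bool) (step : Bool → a → Bool)
    (h : ∀ c x, step c x = (c || f x)) :
    ∀ (l : List a) (c : Bool), l.foldl step c = (c || l.any f) := by
  intro l
  induction l with
  | nil => intro c; simp
  | cons x t ih => intro c; rw [List.foldl_cons, h, ih, List.any_cons, Bool.or_assoc]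

theorem any_range_getD (p : List String → Bool) (l : List (List String)) :
    (List.range l.length).any (fun i => p (l.getD i [])) = l.any p := by
  rw [Bool.eq_iff_iff]
  simp only [List.any_eq_true, List.mem_range]
  constructor
  · rintro ⟨i, hi, hp⟩
    exact ⟨l[i], List.getElem_mem hi, by rwa [List.getD_eq_getElem l [] hi] at hp⟩
  · rintro ⟨x, hx, hp⟩
    obtain ⟨i, hi, rfl⟩ := List.mem_iff_getElem.mp hx
    exact ⟨i, hi, by rwa [List.getD_eq_getElem l [] hi]⟩

-- the outer row loop of A, over any distinct index list with the invariant rows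
theorem outerA (grid : List (List String)) (m : Nat) :
    ∀ (is : List Nat) (g : List (List String)) (hc : Bool),
    (∀ i' ∈ is, g.getD i' [] = grid.getD i' []) →
    List.Pairwise (· ≠ ·) is →
    (g.getD 0 []).length = m →
    ((is.foldl (fun (st : List (List String) × Bool) i =>
      let first := (st.1.getD i []).getD 0 ""
      let r := loopA st.1 i m 0 st.2
      if r.2.1 == m - 1 && ((r.1.getD i []).getD r.2.1 "" == "E") && first == " " then
        (r.1.set i (((r.1.getD i []).set r.2.1 " ").set 0 "E"), true)
      else (r.1, r.2.2)) (g, hc))).2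
    = (hc || is.any (fun i => decide (∃ k < m, pairAt (grid.getD i []) m k))) := by
  intro is
  induction is with
  | nil => intro g hc _ _ _; simp
  | cons i t ih =>
    intro g hc hinv hpw hlen
    obtain ⟨hne, hpw'⟩ := List.pairwise_cons.mp hpw
    have hgi : g.getD i [] = grid.getD i [] := hinv i (List.mem_cons_self)
    have hag : ∀ k, 0 ≤ k → (g.getD i []).getD k "" = (grid.getD i []).getD k "" := by
      intro k _; rw [hgi]
    have hw := loopA_wrap m (grid.getD i []) i 0 g hc hlen hag
    have hdd : decide (∃ k < m, 0 ≤ k ∧ pairAt (grid.getD i []) m k) =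
        decide (∃ k < m, pairAt (grid.getD i []) m k) :=
      decide_eq_decide.mpr ⟨fun ⟨k, hk, _, hp⟩ => ⟨k, hk, hp⟩,
                            fun ⟨k, hk, hp⟩ => ⟨k, hk, Nat.zero_le k, hp⟩⟩
    rw [hdd] at hw
    simp only [List.foldl_cons, List.any_cons]
    try dsimp only
    rw [hgi]
    simp only at hw
    split
    next hcnd =>
      rw [hcnd] at hw
      simp only [if_true] at hw
      rw [ih _ true ?_ hpw' ?_]
      · rw [← Bool.or_assoc, ← hw]
      · intro i' hi'
        rw [getD_set_ne _ _ _ _ _ (hne i' hi'), loopA_other _ _ _ _ _ _ (Ne.symm (hne i' hi'))]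
        exact hinv i' (List.mem_cons_of_mem _ hi')
      · rw [getD_set_len _ _ _ (by simp), loopA_len]
        exact hlen
    next hcnd =>
      rw [Bool.not_eq_true] at hcnd
      rw [hcnd] at hw
      rw [if_neg Bool.false_ne_true] at hw
      rw [ih _ _ ?_ hpw' ?_]
      · rw [hw, Bool.or_assoc]
      · intro i' hi'
        rw [loopA_other _ _ _ _ _ _ (Ne.symm (hne i' hi'))]
        exact hinv i' (List.mem_cons_of_mem _ hi')
      · rw [loopA_len]; exact hlen

theorem updateEast_eq_anyPair (grid : List (List String)) :
    updateEast grid = anyPair (grid.getD 0 []).length grid := by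
  unfold updateEast anyPair
  rw [outerA grid (grid.getD 0 []).length (List.range grid.length) grid false
        (fun _ _ => rfl) (List.nodup_range) rfl]
  rw [Bool.false_or]
  exact any_range_getD
    (fun row => decide (∃ k < (grid.getD 0 []).length, pairAt row (grid.getD 0 []).length k)) grid

-- Python's (j-1) % m round trip: ((j + m - 1) % m + 1) % m = j for j < m
theorem prev_next (m j : Nat) (hm : 1 ≤ m) (hj : j < m) :
    ((j + m - 1) % m + 1) % m = j := by
  rcases Nat.eq_zero_or_pos j with h0 | hpos
  · subst h0
    rw [Nat.zero_add, show (m - 1) % m = m - 1 from Nat.mod_eq_of_lt (by omega),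
        show m - 1 + 1 = m by omega, Nat.mod_self]
  · rw [show j + m - 1 = m + (j - 1) by omega, Nat.add_mod_left,
        show (j - 1) % m = j - 1 from Nat.mod_eq_of_lt (by omega),
        show j - 1 + 1 = j by omega, Nat.mod_eq_of_lt hj]

theorem anyFired (m : Nat) (hm : 1 ≤ m) (row : List String) :
    (List.range m).any (fun j => cellB row m j != row.getD j "") =
      decide (∃ k < m, pairAt row m k) := by
  rw [Bool.eq_iff_iff]
  simp only [List.any_eq_true, List.mem_range, bne_iff_ne, decide_eq_true_eq]
  constructor
  · rintro ⟨j, hj, hne⟩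
    unfold cellB at hne
    by_cases c1 : (row.getD j "" == "E" && row.getD ((j + 1) % m) "" == " ") = true
    · simp only [Bool.and_eq_true, beq_iff_eq] at c1
      exact ⟨j, hj, c1.1, c1.2⟩
    · rw [if_neg c1] at hne
      by_cases c2 : (row.getD j "" == " " && row.getD ((j + m - 1) % m) "" == "E") = true
      · simp only [Bool.and_eq_true, beq_iff_eq] at c2
        refine ⟨(j + m - 1) % m, Nat.mod_lt _ (by omega), c2.2, ?_⟩
        rw [prev_next m j hm hj]
        exact c2.1
      · rw [if_neg c2] at hne
        exact absurd rfl hne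
  · rintro ⟨k, hk, h1, h2⟩
    refine ⟨k, hk, ?_⟩
    unfold cellB
    rw [h1, h2]
    simp

theorem updateEast_alt_eq_anyPair (grid : List (List String))
    (hm : 1 ≤ (grid.getD 0 []).length) :
    updateEast_alt grid = anyPair (grid.getD 0 []).length grid := by
  unfold updateEast_alt anyPair
  dsimp only
  rw [foldl_step_any (fun row => decide (∃ k < (grid.getD 0 []).length,
        pairAt row (grid.getD 0 []).length k)) _ ?_ grid false]
  · rw [Bool.false_or]
  · intro c row
    rw [foldl_step_any (fun j => cellB row (grid.getD 0 []).length j != row.getD j "") _ ?_ _ c]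
    · rw [anyFired _ hm row]
    · intro c' j
      cases h : cellB row (grid.getD 0 []).length j != row.getD j "" <;> simp only [h] <;> simp

-- ===== VERDICT (by name: the statement is the Claim_ definition above) =====
theorem updateEast_spec : Claim_equal_updateEast := by
  intro grid _ hpre
  unfold Spec_updateEast
  rw [updateEast_eq_anyPair, updateEast_alt_eq_anyPair grid hpre.2.1]
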